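-- pv_equiv track=rewrite | github.com/goracle/dirichlet-divisor-conjecture | gauss_circle_conjecture/identities_verification/identity2.py | verify_hardcore
-- ===== SOURCE A (Python) =====
-- import math
--
-- def gaussian_with_norm_leq(N):
--     """Return list of (a,b) with 0 < a^2+b^2 <= N"""
--     R = int(math.isqrt(N))
--     pts = []
--     for a in range(-R, R+1):
--         for b in range(-R, R+1):
--             n = a*a + b*b
--             if 0 < n <= N:
--                 pts.append((a,b))
--     return pts
--
-- def divides(alpha, beta):
--     """Return True if alpha | beta in Z[i]"""
--     aa, ab = alpha
--     ba, bb = beta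
--
--     denom = aa*aa + ab*ab
--     if denom == 0:
--         return False
--
--     # beta / alpha = (beta * conjugate(alpha)) / N(alpha)
--     num_re = ba*aa + bb*ab
--     num_im = bb*aa - ba*ab
--
--     return (num_re % denom == 0) and (num_im % denom == 0)
--
-- def verify_hardcore(X, Y):
--     alphas = gaussian_with_norm_leq(X)
--     betas  = gaussian_with_norm_leq(Y)
--
--     # ---- LHS ----
--     lhs = 0
--     for beta in betas:
--         for alpha in alphas:
--             if divides(alpha, beta):
--                 lhs += 1
--
--     # ---- RHS ----
--     rhs = 0
--     for alpha in alphas: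
--         Na = alpha[0]**2 + alpha[1]**2
--         max_gamma_norm = Y // Na
--         if max_gamma_norm <= 0:
--             continue
--         gammas = gaussian_with_norm_leq(max_gamma_norm)
--         rhs += len(gammas)
--
--     return lhs, rhs
-- ===== SOURCE B (Python) =====
-- import math
--
-- def verify_hardcore(X, Y):
--     # Both sums equal sum over nonzero alpha with N(alpha) <= X of C(Y // N(alpha)),
--     # where C(m) = #{(a,b) != (0,0) : a^2+b^2 <= m}, counted column-wise via isqrt
--     # (the beta = alpha*gamma bijection makes the LHS equal to the RHS).
--     def count_leq(m):
--         r = math.isqrt(m)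
--         return sum(2 * math.isqrt(m - a * a) + 1 for a in range(-r, r + 1)) - 1
--
--     rx = math.isqrt(X)
--     s = 0
--     for a in range(-rx, rx + 1):
--         for b in range(-rx, rx + 1):
--             n = a * a + b * b
--             if 0 < n <= X:
--                 s += count_leq(Y // n)
--     return s, s
-- ===== Notes on version B (the rewrite author's own statement) =====
-- stated objective: faster
-- what changed: Instead of enumerating all beta and testing divisibility against all alpha (and re-enumerating gamma lists for the RHS), B uses the beta = alpha*gamma bijection so both sums equal one sum over alpha of C(Y // N(alpha)), with C(m) computed column-wise by isqrt instead of by point enumeration.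
import Mathlib
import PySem

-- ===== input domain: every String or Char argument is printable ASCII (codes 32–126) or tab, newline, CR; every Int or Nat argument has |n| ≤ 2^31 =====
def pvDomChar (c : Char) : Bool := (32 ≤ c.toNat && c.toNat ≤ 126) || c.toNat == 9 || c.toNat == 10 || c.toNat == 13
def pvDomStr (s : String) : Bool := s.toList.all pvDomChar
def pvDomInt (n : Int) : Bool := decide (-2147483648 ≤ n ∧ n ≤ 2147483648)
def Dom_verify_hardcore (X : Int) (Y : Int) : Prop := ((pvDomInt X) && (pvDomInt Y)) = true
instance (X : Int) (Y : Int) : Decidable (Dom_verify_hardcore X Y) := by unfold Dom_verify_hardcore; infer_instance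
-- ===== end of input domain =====

-- B replaces A's O(X*Y) divisor double loop and per-alpha point enumeration by one sum of
-- column-counted lattice counts C(Y // N(alpha)) (beta = alpha*gamma bijection); objective: faster.
-- Pre_ excludes negative X or Y, where Python's math.isqrt raises ValueError (both in A and in B).

-- ===== PORT A =====
-- math.isqrt, exact for 0 <= n (A raises ValueError for n < 0; excluded by Pre_)
def pyIsqrt (n : Int) : Int := (Nat.sqrt n.toNat : Int)

def gaussian_with_norm_leq (N : Int) : List (Int × Int) :=
  let R := pyIsqrt N
  (PySem.List.pyRange (-R) (R+1) 1).foldl (fun pts a =>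
    (PySem.List.pyRange (-R) (R+1) 1).foldl (fun pts b =>
      let n := a*a + b*b
      if 0 < n ∧ n ≤ N then pts ++ [(a, b)] else pts) pts) []

def divides (alpha beta : Int × Int) : Bool :=
  let aa := alpha.1
  let ab := alpha.2
  let ba := beta.1
  let bb := beta.2
  let denom := aa*aa + ab*ab
  if denom = 0 then false
  else
    let numRe := ba*aa + bb*ab
    let numIm := bb*aa - ba*ab
    (PySem.Int.mod numRe denom == 0) && (PySem.Int.mod numIm denom == 0)

def verify_hardcore (X : Int) (Y : Int) : List Int :=
  let alphas := gaussian_with_norm_leq X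
  let betas := gaussian_with_norm_leq Y
  let lhs := betas.foldl (fun lhs beta =>
    alphas.foldl (fun lhs alpha => if divides alpha beta then lhs + 1 else lhs) lhs) 0
  let rhs := alphas.foldl (fun rhs alpha =>
    let Na := alpha.1 ^ 2 + alpha.2 ^ 2
    let maxGammaNorm := PySem.Int.floordiv Y Na
    if maxGammaNorm ≤ 0 then rhs
    else rhs + PySem.List.len (gaussian_with_norm_leq maxGammaNorm)) 0
  [lhs, rhs]

-- ===== PORT B =====
def count_leq (m : Int) : Int :=
  let r := pyIsqrt m
  ((PySem.List.pyRange (-r) (r+1) 1).map (fun a => 2 * pyIsqrt (m - a*a) + 1)).sum - 1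

def verify_hardcore_alt (X : Int) (Y : Int) : List Int :=
  let rx := pyIsqrt X
  let s := (PySem.List.pyRange (-rx) (rx+1) 1).foldl (fun s a =>
    (PySem.List.pyRange (-rx) (rx+1) 1).foldl (fun s b =>
      let n := a*a + b*b
      if 0 < n ∧ n ≤ X then s + count_leq (PySem.Int.floordiv Y n) else s) s) 0
  [s, s]

-- ===== PRECONDITION & SPEC =====
-- A (and B) call math.isqrt on X and on Y, which raises ValueError for negative arguments.
def Pre_verify_hardcore (X : Int) (Y : Int) : Prop := 0 ≤ X ∧ 0 ≤ Y
instance (X : Int) (Y : Int) : Decidable (Pre_verify_hardcore X Y) := by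
  unfold Pre_verify_hardcore; infer_instance

def pvWitness_verify_hardcore : Int × Int := (5, 7)

def Spec_verify_hardcore (X : Int) (Y : Int) (out : List Int) : Prop := out = verify_hardcore_alt X Y
instance (X : Int) (Y : Int) (out : List Int) : Decidable (Spec_verify_hardcore X Y out) := by
  unfold Spec_verify_hardcore; infer_instance

-- ===== CLAIM (what is proved, stated in full; the proofs are below) =====
def Claim_equal_verify_hardcore : Prop := ∀ (X : Int) (Y : Int), Dom_verify_hardcore X Y → Pre_verify_hardcore X Y → Spec_verify_hardcore X Y (verify_hardcore X Y)

-- ===== LEMMAS AND PROOFS =====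

def Gnorm (p : Int × Int) : Int := p.1 * p.1 + p.2 * p.2

def gmul (a g : Int × Int) : Int × Int := (a.1 * g.1 - a.2 * g.2, a.1 * g.2 + a.2 * g.1)

def Tsum (X Y : Int) : Int :=
  ((PySem.List.pyRange (-(pyIsqrt X)) (pyIsqrt X + 1) 1).map (fun a =>
    ((PySem.List.pyRange (-(pyIsqrt X)) (pyIsqrt X + 1) 1).map (fun b =>
      if 0 < a*a + b*b ∧ a*a + b*b ≤ X then count_leq (PySem.Int.floordiv Y (a*a + b*b)) else 0)).sum)).sum

lemma pyIsqrt_nonneg (n : Int) : 0 ≤ pyIsqrt n := Int.natCast_nonneg _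

lemma sq_pyIsqrt_le {n : Int} (h : 0 ≤ n) : pyIsqrt n * pyIsqrt n ≤ n := by
  unfold pyIsqrt
  have h1 : Nat.sqrt n.toNat * Nat.sqrt n.toNat ≤ n.toNat := Nat.sqrt_le n.toNat
  have h2 : (n.toNat : Int) = n := Int.toNat_of_nonneg h
  push_cast at h1 ⊢
  omega

lemma lt_succ_pyIsqrt {n : Int} (h : 0 ≤ n) : n < (pyIsqrt n + 1) * (pyIsqrt n + 1) := by
  unfold pyIsqrt
  have h1 : n.toNat < (Nat.sqrt n.toNat + 1) * (Nat.sqrt n.toNat + 1) := Nat.lt_succ_sqrt n.toNat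
  have h2 : (((Nat.sqrt n.toNat + 1) * (Nat.sqrt n.toNat + 1) : Nat) : Int)
      = ((Nat.sqrt n.toNat : Int) + 1) * ((Nat.sqrt n.toNat : Int) + 1) := by push_cast; ring
  omega

lemma le_pyIsqrt {a n : Int} (hn : 0 ≤ n) (h : a * a ≤ n) :
    -pyIsqrt n ≤ a ∧ a ≤ pyIsqrt n := by
  have h0 : ((a.natAbs * a.natAbs : Nat) : Int) = a * a := Int.natAbs_mul_self
  have h1 : a.natAbs * a.natAbs ≤ n.toNat := by omega
  have h2 : a.natAbs ≤ Nat.sqrt n.toNat := Nat.le_sqrt.mpr h1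
  unfold pyIsqrt
  omega

lemma pyIsqrt_le_pyIsqrt {m n : Int} (h : m ≤ n) : pyIsqrt m ≤ pyIsqrt n := by
  unfold pyIsqrt
  exact_mod_cast Nat.sqrt_le_sqrt (by omega)

lemma G_eq (N : Int) :
    gaussian_with_norm_leq N =
    (PySem.List.pyRange (-(pyIsqrt N)) (pyIsqrt N + 1) 1).flatMap (fun a =>
      ((PySem.List.pyRange (-(pyIsqrt N)) (pyIsqrt N + 1) 1).filter
        (fun b => decide (0 < a*a + b*b ∧ a*a + b*b ≤ N))).map (fun b => (a, b))) := by
  simp only [gaussian_with_norm_leq]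
  rw [show (fun (pts : List (Int × Int)) (a : Int) =>
        List.foldl (fun (pts : List (Int × Int)) (b : Int) =>
          if 0 < a * a + b * b ∧ a * a + b * b ≤ N then pts ++ [(a, b)] else pts) pts
          (PySem.List.pyRange (-pyIsqrt N) (pyIsqrt N + 1) 1))
      = (fun (pts : List (Int × Int)) (a : Int) => pts ++
          ((PySem.List.pyRange (-(pyIsqrt N)) (pyIsqrt N + 1) 1).filter
            (fun b => decide (0 < a*a + b*b ∧ a*a + b*b ≤ N))).map (fun b => ((a, b) : Int × Int)))
    from funext fun pts => funext fun a => by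
      rw [show (fun (pts : List (Int × Int)) (b : Int) =>
            if 0 < a * a + b * b ∧ a * a + b * b ≤ N then pts ++ [(a, b)] else pts)
          = (fun (pts : List (Int × Int)) (b : Int) =>
              if (fun b => decide (0 < a * a + b * b ∧ a * a + b * b ≤ N)) b = true
              then pts ++ [((a, b) : Int × Int)] else pts)
        from funext fun pts => funext fun b => by
          by_cases h : 0 < a * a + b * b ∧ a * a + b * b ≤ N <;> simp [h]]
      exact PySem.List.foldl_append_if _ _ _ _]
  rw [PySem.List.foldl_append_eq_flatMap]
  simp

lemma mem_G {N : Int} (hN : 0 ≤ N) (p : Int × Int) :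
    p ∈ gaussian_with_norm_leq N ↔ 0 < Gnorm p ∧ Gnorm p ≤ N := by
  rw [G_eq]
  simp only [List.mem_flatMap, List.mem_map, List.mem_filter, PySem.List.mem_pyRange_one,
    decide_eq_true_eq]
  unfold Gnorm
  constructor
  · rintro ⟨a, ⟨ha1, ha2⟩, b, ⟨⟨hb1, hb2⟩, hc⟩, rfl⟩
    exact hc
  · rintro ⟨hpos, hle⟩
    have h1 : p.1 * p.1 ≤ N := by nlinarith [mul_self_nonneg p.2]
    have h2 : p.2 * p.2 ≤ N := by nlinarith [mul_self_nonneg p.1]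
    obtain ⟨ha1, ha2⟩ := le_pyIsqrt hN h1
    obtain ⟨hb1, hb2⟩ := le_pyIsqrt hN h2
    exact ⟨p.1, ⟨ha1, by omega⟩, p.2, ⟨⟨hb1, by omega⟩, hpos, hle⟩, rfl⟩

lemma nodup_G (N : Int) : (gaussian_with_norm_leq N).Nodup := by
  rw [G_eq, List.nodup_flatMap]
  constructor
  · intro a _
    exact List.Nodup.map (fun x y h => by simpa using h)
      ((PySem.List.nodup_pyRange_one _ _).filter _)
  · refine List.Pairwise.imp ?_ (PySem.List.nodup_pyRange_one _ _)
    intro a b hab x hx1 hx2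
    simp only [List.mem_map, List.mem_filter] at hx1 hx2
    obtain ⟨b1, _, rfl⟩ := hx1
    obtain ⟨b2, _, h2⟩ := hx2
    exact hab (congrArg Prod.fst h2).symm

lemma divides_iff (α β : Int × Int) (h : Gnorm α ≠ 0) :
    divides α β = true ↔ ∃ γ : Int × Int, β = gmul α γ := by
  unfold Gnorm at h
  simp only [divides]
  rw [if_neg h, Bool.and_eq_true, beq_iff_eq, beq_iff_eq,
    PySem.Int.mod_eq_zero_iff_dvd, PySem.Int.mod_eq_zero_iff_dvd]
  constructor
  · rintro ⟨⟨qr, hr⟩, ⟨qi, hi⟩⟩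
    refine ⟨(qr, qi), ?_⟩
    have e1 : (α.1*α.1 + α.2*α.2) * β.1 = (α.1*α.1 + α.2*α.2) * (α.1 * qr - α.2 * qi) := by
      linear_combination α.1 * hr - α.2 * hi
    have e2 : (α.1*α.1 + α.2*α.2) * β.2 = (α.1*α.1 + α.2*α.2) * (α.1 * qi + α.2 * qr) := by
      linear_combination α.2 * hr + α.1 * hi
    exact Prod.ext_iff.mpr ⟨mul_left_cancel₀ h e1, mul_left_cancel₀ h e2⟩
  · rintro ⟨γ, rfl⟩
    exact ⟨⟨γ.1, by simp only [gmul]; ring⟩, ⟨γ.2, by simp only [gmul]; ring⟩⟩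

lemma gmul_left_cancel {α : Int × Int} (h : Gnorm α ≠ 0) {γ₁ γ₂ : Int × Int}
    (heq : gmul α γ₁ = gmul α γ₂) : γ₁ = γ₂ := by
  have h1 := congrArg Prod.fst heq
  have h2 := congrArg Prod.snd heq
  simp only [gmul] at h1 h2
  unfold Gnorm at h
  have e1 : (α.1*α.1 + α.2*α.2) * γ₁.1 = (α.1*α.1 + α.2*α.2) * γ₂.1 := by
    linear_combination α.1 * h1 + α.2 * h2
  have e2 : (α.1*α.1 + α.2*α.2) * γ₁.2 = (α.1*α.1 + α.2*α.2) * γ₂.2 := by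
    linear_combination α.1 * h2 - α.2 * h1
  exact Prod.ext_iff.mpr ⟨mul_left_cancel₀ h e1, mul_left_cancel₀ h e2⟩

lemma Gnorm_gmul (α γ : Int × Int) : Gnorm (gmul α γ) = Gnorm α * Gnorm γ := by
  simp only [Gnorm, gmul]; ring

lemma colLen_eq {N : Int} (a : Int) (hN : 0 ≤ N) (ha : a * a ≤ N) :
    ((((PySem.List.pyRange (-(pyIsqrt N)) (pyIsqrt N + 1) 1).filter
        (fun b => decide (0 < a*a + b*b ∧ a*a + b*b ≤ N))).length : Int))
    = 2 * pyIsqrt (N - a*a) + 1 - (if a = 0 then 1 else 0) := by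
  have hR0 : 0 ≤ pyIsqrt N := pyIsqrt_nonneg N
  have hs0 : 0 ≤ pyIsqrt (N - a*a) := pyIsqrt_nonneg _
  have hsR : pyIsqrt (N - a*a) ≤ pyIsqrt N := pyIsqrt_le_pyIsqrt (by nlinarith [mul_self_nonneg a])
  have hs2 : pyIsqrt (N - a*a) * pyIsqrt (N - a*a) ≤ N - a*a := sq_pyIsqrt_le (by omega)
  have hs3 : N - a*a < (pyIsqrt (N - a*a) + 1) * (pyIsqrt (N - a*a) + 1) := lt_succ_pyIsqrt (by omega)
  have hR2 : pyIsqrt N * pyIsqrt N ≤ N := sq_pyIsqrt_le hN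
  by_cases ha0 : a = 0
  · subst ha0
    rw [PySem.List.pyRange_one_append (-(pyIsqrt N)) 0 (pyIsqrt N + 1) (by omega) (by omega),
        PySem.List.pyRange_one_append 0 1 (pyIsqrt N + 1) (by omega) (by omega),
        show PySem.List.pyRange 0 1 1 = [0] from by decide]
    rw [List.filter_append, List.filter_append]
    have e1 : (PySem.List.pyRange (-(pyIsqrt N)) 0 1).filter
        (fun b => decide (0 < 0*0 + b*b ∧ 0*0 + b*b ≤ N)) = PySem.List.pyRange (-(pyIsqrt N)) 0 1 := by
      rw [List.filter_eq_self]
      intro b hb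
      rw [PySem.List.mem_pyRange_one] at hb
      simp only [decide_eq_true_eq]
      have hb1 : pyIsqrt N + b ≥ 0 := by omega
      have hb2 : b*b ≤ pyIsqrt N * pyIsqrt N := by nlinarith
      constructor
      · nlinarith
      · nlinarith
    have e2 : ([0] : List Int).filter (fun b => decide (0 < 0*0 + b*b ∧ 0*0 + b*b ≤ N)) = [] := by
      simp
    have e3 : (PySem.List.pyRange 1 (pyIsqrt N + 1) 1).filter
        (fun b => decide (0 < 0*0 + b*b ∧ 0*0 + b*b ≤ N)) = PySem.List.pyRange 1 (pyIsqrt N + 1) 1 := by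
      rw [List.filter_eq_self]
      intro b hb
      rw [PySem.List.mem_pyRange_one] at hb
      simp only [decide_eq_true_eq]
      have hb2 : b*b ≤ pyIsqrt N * pyIsqrt N := by nlinarith
      constructor
      · nlinarith
      · nlinarith
    rw [e1, e2, e3]
    simp only [List.length_append, List.length_nil, PySem.List.length_pyRange_one]
    rw [show N - 0*0 = N from by ring]
    split_ifs with h
    · omega
    · simp at h
  · rw [PySem.List.pyRange_one_append (-(pyIsqrt N)) (-(pyIsqrt (N - a*a))) (pyIsqrt N + 1)
          (by omega) (by omega),
        PySem.List.pyRange_one_append (-(pyIsqrt (N - a*a))) (pyIsqrt (N - a*a) + 1) (pyIsqrt N + 1)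
          (by omega) (by omega)]
    rw [List.filter_append, List.filter_append]
    have e1 : (PySem.List.pyRange (-(pyIsqrt N)) (-(pyIsqrt (N - a*a))) 1).filter
        (fun b => decide (0 < a*a + b*b ∧ a*a + b*b ≤ N)) = [] := by
      rw [List.filter_eq_nil_iff]
      intro b hb
      rw [PySem.List.mem_pyRange_one] at hb
      simp only [decide_eq_true_eq]
      intro hcon
      have hble : pyIsqrt (N - a*a) + 1 ≤ -b := by omega
      have h4 : (pyIsqrt (N - a*a) + 1) * (pyIsqrt (N - a*a) + 1) ≤ (-b) * (-b) :=
        mul_self_le_mul_self (by omega) hble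
      nlinarith [hcon.2]
    have e2 : (PySem.List.pyRange (-(pyIsqrt (N - a*a))) (pyIsqrt (N - a*a) + 1) 1).filter
        (fun b => decide (0 < a*a + b*b ∧ a*a + b*b ≤ N))
        = PySem.List.pyRange (-(pyIsqrt (N - a*a))) (pyIsqrt (N - a*a) + 1) 1 := by
      rw [List.filter_eq_self]
      intro b hb
      rw [PySem.List.mem_pyRange_one] at hb
      simp only [decide_eq_true_eq]
      have hbb : b*b ≤ pyIsqrt (N - a*a) * pyIsqrt (N - a*a) := by
        nlinarith [mul_nonneg (show (0:Int) ≤ pyIsqrt (N - a*a) - b by omega)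
          (show (0:Int) ≤ pyIsqrt (N - a*a) + b by omega)]
      have hapos : 0 < a * a := mul_self_pos.mpr ha0
      constructor
      · nlinarith [mul_self_nonneg b]
      · nlinarith
    have e3 : (PySem.List.pyRange (pyIsqrt (N - a*a) + 1) (pyIsqrt N + 1) 1).filter
        (fun b => decide (0 < a*a + b*b ∧ a*a + b*b ≤ N)) = [] := by
      rw [List.filter_eq_nil_iff]
      intro b hb
      rw [PySem.List.mem_pyRange_one] at hb
      simp only [decide_eq_true_eq]
      intro hcon
      have h4 : (pyIsqrt (N - a*a) + 1) * (pyIsqrt (N - a*a) + 1) ≤ b * b :=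
        mul_self_le_mul_self (by omega) (by omega)
      nlinarith [hcon.2]
    rw [e1, e2, e3]
    simp only [List.length_append, List.length_nil, PySem.List.length_pyRange_one]
    rw [if_neg ha0]
    omega

lemma len_G {N : Int} (hN : 0 ≤ N) :
    ((gaussian_with_norm_leq N).length : Int) = count_leq N := by
  rw [G_eq, List.length_flatMap, Nat.cast_list_sum, List.map_map]
  have hterm : ∀ x ∈ PySem.List.pyRange (-(pyIsqrt N)) (pyIsqrt N + 1) 1,
      ((Nat.cast ∘ fun a => (((PySem.List.pyRange (-(pyIsqrt N)) (pyIsqrt N + 1) 1).filter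
          (fun b => decide (0 < a*a + b*b ∧ a*a + b*b ≤ N))).map
            (fun b => ((a, b) : Int × Int))).length) x : Int)
      = (fun a => 2 * pyIsqrt (N - a*a) + 1 + (if a = 0 then (-1:Int) else 0)) x := by
    intro x hx
    rw [PySem.List.mem_pyRange_one] at hx
    have hx2 : x * x ≤ N := by
      nlinarith [mul_nonneg (show (0:Int) ≤ pyIsqrt N - x by omega)
        (show (0:Int) ≤ pyIsqrt N + x by omega), sq_pyIsqrt_le hN]
    simp only [Function.comp_apply, List.length_map]
    rw [colLen_eq x hN hx2]
    split_ifs <;> ring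
  rw [List.map_congr_left hterm,
    PySem.List.sum_map_add_int (PySem.List.pyRange (-(pyIsqrt N)) (pyIsqrt N + 1) 1)
      (fun a => 2 * pyIsqrt (N - a*a) + 1) (fun a => if a = 0 then (-1:Int) else 0)]
  have hR0 : 0 ≤ pyIsqrt N := pyIsqrt_nonneg N
  have z : ∀ (lo hi : Int), (∀ x ∈ PySem.List.pyRange lo hi 1, x ≠ 0) →
      ((PySem.List.pyRange lo hi 1).map (fun a => if a = 0 then (-1:Int) else 0)).sum = 0 := by
    intro lo hi hne
    rw [List.map_congr_left (g := fun _ => (0:Int)) (fun x hx => if_neg (hne x hx))]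
    simp
  have hzero : ((PySem.List.pyRange (-(pyIsqrt N)) (pyIsqrt N + 1) 1).map
      (fun a => if a = 0 then (-1 : Int) else 0)).sum = -1 := by
    rw [PySem.List.pyRange_one_append (-(pyIsqrt N)) 0 (pyIsqrt N + 1) (by omega) (by omega),
        PySem.List.pyRange_one_append 0 1 (pyIsqrt N + 1) (by omega) (by omega),
        show PySem.List.pyRange 0 1 1 = [0] from by decide]
    rw [List.map_append, List.map_append, List.sum_append, List.sum_append]
    rw [z (-(pyIsqrt N)) 0 (fun x hx => by rw [PySem.List.mem_pyRange_one] at hx; omega),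
        z 1 (pyIsqrt N + 1) (fun x hx => by rw [PySem.List.mem_pyRange_one] at hx; omega)]
    simp
  rw [hzero]
  simp only [count_leq]
  ring

lemma floordiv_nonneg' {Y n : Int} (hY : 0 ≤ Y) (hn : 0 < n) :
    0 ≤ PySem.Int.floordiv Y n := by
  rw [PySem.Int.floordiv_eq_ediv_of_pos hn]
  exact Int.ediv_nonneg hY hn.le

lemma countP_divides_eq {α : Int × Int} (hα : 0 < Gnorm α) {Y : Int} (hY : 0 ≤ Y) :
    (gaussian_with_norm_leq Y).countP (fun β => divides α β)
    = (gaussian_with_norm_leq (PySem.Int.floordiv Y (Gnorm α))).length := by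
  have hm : 0 ≤ PySem.Int.floordiv Y (Gnorm α) := floordiv_nonneg' hY hα
  rw [List.countP_eq_length_filter,
    ← List.toFinset_card_of_nodup ((nodup_G Y).filter _),
    ← List.toFinset_card_of_nodup (nodup_G (PySem.Int.floordiv Y (Gnorm α)))]
  symm
  refine Finset.card_bij (fun γ _ => gmul α γ) ?_ ?_ ?_
  · intro γ hγ
    rw [List.mem_toFinset, mem_G hm] at hγ
    rw [List.mem_toFinset, List.mem_filter]
    constructor
    · rw [mem_G hY, Gnorm_gmul]
      refine ⟨mul_pos hα hγ.1, ?_⟩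
      have h2 := (PySem.Int.le_floordiv_iff_mul_le hα).mp hγ.2
      calc Gnorm α * Gnorm γ = Gnorm γ * Gnorm α := mul_comm _ _
        _ ≤ Y := h2
    · exact (divides_iff α _ (ne_of_gt hα)).mpr ⟨γ, rfl⟩
  · intro γ₁ _ γ₂ _ heq
    exact gmul_left_cancel (ne_of_gt hα) heq
  · intro β hβ
    rw [List.mem_toFinset, List.mem_filter, mem_G hY] at hβ
    obtain ⟨⟨hpos, hle⟩, hdiv⟩ := hβ
    obtain ⟨γ, rfl⟩ := (divides_iff α β (ne_of_gt hα)).mp hdiv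
    rw [Gnorm_gmul] at hpos hle
    have hγpos : 0 < Gnorm γ := by
      rcases lt_or_ge 0 (Gnorm γ) with hg | hg
      · exact hg
      · nlinarith
    refine ⟨γ, ?_, rfl⟩
    rw [List.mem_toFinset, mem_G hm]
    refine ⟨hγpos, ?_⟩
    rw [PySem.Int.le_floordiv_iff_mul_le hα]
    calc Gnorm γ * Gnorm α = Gnorm α * Gnorm γ := mul_comm _ _
      _ ≤ Y := hle

lemma sum_map_swap {a b : Type} (l1 : List a) (l2 : List b) (f : a → b → Int) :
    (l1.map (fun x => (l2.map (fun y => f x y)).sum)).sum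
    = (l2.map (fun y => (l1.map (fun x => f x y)).sum)).sum := by
  induction l1 with
  | nil => simp
  | cons h t ih =>
      simp only [List.map_cons, List.sum_cons, ih]
      rw [← PySem.List.sum_map_add_int]

lemma sum_map_filter_ite {a : Type} (l : List a) (p : a → Bool) (f : a → Int) :
    ((l.filter p).map f).sum = (l.map (fun x => if p x then f x else 0)).sum := by
  induction l with
  | nil => rfl
  | cons h t ih => by_cases hp : p h <;> simp [hp, ih]

lemma sum_flatMap_int {a : Type} (l : List a) (g : a → List Int) :
    (l.flatMap g).sum = (l.map (fun x => (g x).sum)).sum := by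
  induction l with
  | nil => rfl
  | cons h t ih => simp [List.flatMap_cons, ih]

lemma sum_G (N : Int) (f : Int × Int → Int) :
    ((gaussian_with_norm_leq N).map f).sum
    = ((PySem.List.pyRange (-(pyIsqrt N)) (pyIsqrt N + 1) 1).map (fun a =>
        ((PySem.List.pyRange (-(pyIsqrt N)) (pyIsqrt N + 1) 1).map (fun b =>
          if 0 < a*a + b*b ∧ a*a + b*b ≤ N then f (a, b) else 0)).sum)).sum := by
  rw [G_eq, List.map_flatMap, sum_flatMap_int]
  refine congrArg List.sum (List.map_congr_left fun x _ => ?_)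
  rw [List.map_map, sum_map_filter_ite]
  refine congrArg List.sum (List.map_congr_left fun y _ => ?_)
  by_cases h : 0 < x*x + y*y ∧ x*x + y*y ≤ N <;> simp [h]

lemma B_inner (X Y a s0 : Int) :
    (PySem.List.pyRange (-(pyIsqrt X)) (pyIsqrt X + 1) 1).foldl
      (fun s b => if 0 < a*a + b*b ∧ a*a + b*b ≤ X
        then s + count_leq (PySem.Int.floordiv Y (a*a + b*b)) else s) s0
    = s0 + ((PySem.List.pyRange (-(pyIsqrt X)) (pyIsqrt X + 1) 1).map
        (fun b => if 0 < a*a + b*b ∧ a*a + b*b ≤ X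
          then count_leq (PySem.Int.floordiv Y (a*a + b*b)) else 0)).sum := by
  rw [show (fun (s : Int) (b : Int) => if 0 < a*a + b*b ∧ a*a + b*b ≤ X
        then s + count_leq (PySem.Int.floordiv Y (a*a + b*b)) else s)
      = (fun (s : Int) (b : Int) => s + (if 0 < a*a + b*b ∧ a*a + b*b ≤ X
          then count_leq (PySem.Int.floordiv Y (a*a + b*b)) else 0))
    from funext fun s => funext fun b => by split_ifs <;> simp]
  exact PySem.List.foldl_add _ _ _

lemma alt_eq (X Y : Int) : verify_hardcore_alt X Y = [Tsum X Y, Tsum X Y] := by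
  simp only [verify_hardcore_alt]
  simp only [B_inner]
  rw [PySem.List.foldl_add]
  simp only [Tsum, zero_add]

lemma lhs_eq (X Y : Int) (hX : 0 ≤ X) (hY : 0 ≤ Y) :
    (gaussian_with_norm_leq Y).foldl (fun lhs beta =>
      (gaussian_with_norm_leq X).foldl
        (fun lhs alpha => if divides alpha beta then lhs + 1 else lhs) lhs) 0
    = Tsum X Y := by
  simp only [PySem.List.foldl_if_add_one, PySem.List.foldl_add, zero_add]
  have h1 : ∀ β : Int × Int,
      ((List.countP (fun alpha => divides alpha β) (gaussian_with_norm_leq X) : Nat) : Int)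
      = ((gaussian_with_norm_leq X).map (fun alpha => if divides alpha β then (1:Int) else 0)).sum :=
    fun β => (PySem.List.sum_map_ite_one_zero _ _).symm
  simp only [h1]
  rw [sum_map_swap (gaussian_with_norm_leq Y) (gaussian_with_norm_leq X)
    (fun β alpha => if divides alpha β = true then (1:Int) else 0)]
  simp only [PySem.List.sum_map_ite_one_zero]
  have hmm : ∀ alpha ∈ gaussian_with_norm_leq X,
      ((List.countP (fun β => divides alpha β) (gaussian_with_norm_leq Y) : Nat) : Int)
      = count_leq (PySem.Int.floordiv Y (Gnorm alpha)) := by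
    intro alpha hmem
    rw [mem_G hX] at hmem
    rw [countP_divides_eq hmem.1 hY]
    exact len_G (floordiv_nonneg' hY hmem.1)
  rw [List.map_congr_left hmm,
    sum_G X (fun p => count_leq (PySem.Int.floordiv Y (Gnorm p)))]
  simp only [Tsum, Gnorm]

lemma rhs_eq (X Y : Int) (hX : 0 ≤ X) (hY : 0 ≤ Y) :
    (gaussian_with_norm_leq X).foldl (fun rhs alpha =>
      if PySem.Int.floordiv Y (alpha.1 ^ 2 + alpha.2 ^ 2) ≤ 0 then rhs
      else rhs + PySem.List.len (gaussian_with_norm_leq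
        (PySem.Int.floordiv Y (alpha.1 ^ 2 + alpha.2 ^ 2)))) 0
    = Tsum X Y := by
  rw [show (fun (rhs : Int) (alpha : Int × Int) =>
        if PySem.Int.floordiv Y (alpha.1 ^ 2 + alpha.2 ^ 2) ≤ 0 then rhs
        else rhs + PySem.List.len (gaussian_with_norm_leq
          (PySem.Int.floordiv Y (alpha.1 ^ 2 + alpha.2 ^ 2))))
      = (fun (rhs : Int) (alpha : Int × Int) => rhs +
          (if PySem.Int.floordiv Y (alpha.1 ^ 2 + alpha.2 ^ 2) ≤ 0 then 0
           else PySem.List.len (gaussian_with_norm_leq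
             (PySem.Int.floordiv Y (alpha.1 ^ 2 + alpha.2 ^ 2)))))
    from funext fun rhs => funext fun alpha => by split_ifs <;> simp]
  rw [PySem.List.foldl_add, zero_add]
  have hmm : ∀ alpha ∈ gaussian_with_norm_leq X,
      (if PySem.Int.floordiv Y (alpha.1 ^ 2 + alpha.2 ^ 2) ≤ 0 then (0:Int)
       else PySem.List.len (gaussian_with_norm_leq
         (PySem.Int.floordiv Y (alpha.1 ^ 2 + alpha.2 ^ 2))))
      = count_leq (PySem.Int.floordiv Y (Gnorm alpha)) := by
    intro alpha hmem
    rw [mem_G hX] at hmem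
    have hg : alpha.1 ^ 2 + alpha.2 ^ 2 = Gnorm alpha := by unfold Gnorm; ring
    rw [hg]
    have hm := floordiv_nonneg' hY hmem.1
    split_ifs with h
    · rw [le_antisymm h hm]
      decide
    · rw [PySem.List.len_eq, len_G hm]
  rw [List.map_congr_left hmm,
    sum_G X (fun p => count_leq (PySem.Int.floordiv Y (Gnorm p)))]
  simp only [Tsum, Gnorm]

-- ===== VERDICT (by name: the statement is the Claim_ definition above) =====
theorem verify_hardcore_spec : Claim_equal_verify_hardcore := by
  unfold Claim_equal_verify_hardcore
  intro X Y _ hpre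
  obtain ⟨hX, hY⟩ := hpre
  unfold Spec_verify_hardcore
  rw [alt_eq]
  simp only [verify_hardcore]
  rw [lhs_eq X Y hX hY, rhs_eq X Y hX hY]
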